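-- pv_equiv track=rewrite | github.com/MatthewTess/CSE15-Discrete-Mathematics | 015/Lab5/lab_5.py | is_injective
-- ===== SOURCE A (Python) =====
-- def is_injective(A, B, f):
--     for element in f:
--         a = element[0]
--         b = element[1]
--         for other in f:
--             if other != element:
--                 bprime = other[1]
--                 if b == bprime:
--                     return False
--     return True
-- ===== SOURCE B (Python) =====
-- def is_injective(A, B, f):
--     pairs = set(f)
--     return len({p[1] for p in pairs}) == len(pairs)
-- ===== Notes on version B (the rewrite author's own statement) =====
-- stated objective: simpler
-- what changed: Replaces the nested pairwise scan with a closed-form counting check: deduplicate f into a set and compare the number of distinct second coordinates with the number of distinct pairs.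
import Mathlib
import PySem

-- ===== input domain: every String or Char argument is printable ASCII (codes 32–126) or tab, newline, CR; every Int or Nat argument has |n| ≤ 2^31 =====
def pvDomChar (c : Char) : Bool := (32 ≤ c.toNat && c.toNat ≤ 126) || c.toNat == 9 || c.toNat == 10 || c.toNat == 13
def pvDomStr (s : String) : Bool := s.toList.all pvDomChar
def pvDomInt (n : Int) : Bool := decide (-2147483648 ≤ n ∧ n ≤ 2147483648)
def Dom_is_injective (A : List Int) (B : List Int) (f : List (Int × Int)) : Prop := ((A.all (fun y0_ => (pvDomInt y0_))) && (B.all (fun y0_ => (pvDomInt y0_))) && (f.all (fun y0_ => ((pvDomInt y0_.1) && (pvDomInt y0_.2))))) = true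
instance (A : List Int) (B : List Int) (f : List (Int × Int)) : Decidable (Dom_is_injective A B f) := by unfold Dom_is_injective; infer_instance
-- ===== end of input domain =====

-- B replaces A's nested pairwise scan with a single counting check: deduplicate f
-- and compare the number of distinct second coordinates with the number of distinct pairs (simpler).


-- ===== PORT A =====
-- nested loops with early 'return False' ported as List.all over the same two scans of f
def is_injective (A : List Int) (B : List Int) (f : List (Int × Int)) : Bool :=
  f.all (fun element =>
    f.all (fun other =>
      !(other != element && other.2 == element.2)))

-- ===== PORT B =====
def is_injective_alt (A : List Int) (B : List Int) (f : List (Int × Int)) : Bool :=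
  let pairs : PySem.Set (Int × Int) := PySem.Set.ofList f
  let seconds : PySem.Set Int := PySem.Set.ofList (pairs.map (fun p => p.2))
  seconds.length == pairs.length

-- ===== PRECONDITION & SPEC =====
def Spec_is_injective (A : List Int) (B : List Int) (f : List (Int × Int)) (out : Bool) : Prop := out = is_injective_alt A B f
instance (A : List Int) (B : List Int) (f : List (Int × Int)) (out : Bool) : Decidable (Spec_is_injective A B f out) := by unfold Spec_is_injective; infer_instance

-- ===== CLAIM (what is proved, stated in full; the proofs are below) =====
def Claim_equal_is_injective : Prop := ∀ (A : List Int) (B : List Int) (f : List (Int × Int)), Dom_is_injective A B f → Spec_is_injective A B f (is_injective A B f)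

-- ===== LEMMAS AND PROOFS =====

theorem pv_ofList_sublist {α : Type} [BEq α] [LawfulBEq α] (l : List α) :
    (PySem.Set.ofList l).Sublist l := by
  induction l with
  | nil => simp [PySem.Set.ofList, PySem.Set.empty]
  | cons x xs ih =>
    rw [PySem.Set.ofList_cons]
    exact List.Sublist.cons₂ x (List.Sublist.trans List.filter_sublist ih)

theorem pv_length_ofList_eq_iff {α : Type} [BEq α] [LawfulBEq α] (l : List α) :
    (PySem.Set.ofList l).length = l.length ↔ l.Nodup := by
  constructor
  · intro h
    have := (pv_ofList_sublist l).eq_of_length h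
    rw [← this]; exact PySem.Set.nodup_ofList l
  · intro h; rw [PySem.Set.ofList_eq_self_of_nodup l h]

-- B returns True iff snd is injective on the distinct pairs of f
theorem pv_alt_iff (A B : List Int) (f : List (Int × Int)) :
    is_injective_alt A B f = true ↔ ∀ e ∈ f, ∀ o ∈ f, o.2 = e.2 → o = e := by
  have hnd : (PySem.Set.ofList f).Nodup := PySem.Set.nodup_ofList f
  simp only [is_injective_alt, beq_iff_eq]
  rw [show (PySem.Set.ofList ((PySem.Set.ofList f).map (fun p => p.2))).length
        = (PySem.Set.ofList f).length
      ↔ ((PySem.Set.ofList f).map (fun p => p.2)).Nodup from by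
    constructor
    · intro h; exact (pv_length_ofList_eq_iff _).1 (by rw [h, List.length_map])
    · intro h; rw [(pv_length_ofList_eq_iff _).2 h, List.length_map]]
  rw [List.nodup_map_iff_inj_on hnd]
  constructor
  · intro h e he o ho h2
    exact h o ((PySem.Set.mem_ofList f o).2 ho) e ((PySem.Set.mem_ofList f e).2 he) h2
  · intro h x hx y hy hxy
    exact h y ((PySem.Set.mem_ofList f y).1 hy) x ((PySem.Set.mem_ofList f x).1 hx) hxy

-- ===== VERDICT (by name: the statement is the Claim_ definition above) =====
theorem is_injective_spec : Claim_equal_is_injective := by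
  intro A B f _
  unfold Spec_is_injective
  rw [Bool.eq_iff_iff, pv_alt_iff]
  simp [is_injective, Prod.ext_iff]
  constructor <;> intro h a b hab a2 b1 h2 <;> have := h a b hab a2 b1 h2 <;> tauto
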